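-- pv_equiv track=rewrite | github.com/dhrumil2312/RNAWebsite_v2 | QLRNA/Extract_UBP.py | type_1_ubp
-- ===== SOURCE A (Python) =====
-- def type_1_ubp(dp):
--     ubp_info = []
--     candi_pos_list = []
--     for i in range(len(dp)):
--         if dp[i] == '(':
--             candi_pos_list.append(i)
--     if len(candi_pos_list) <= 1:
--         return ubp_info
--     else:
--         for i in range(len(candi_pos_list) - 1):
--             st_i = candi_pos_list[i]
--             ed_i = candi_pos_list[i+1]
--             if ed_i - st_i > 1 and ')' not in dp[st_i+1:ed_i]:
--                 ubp_info.append([st_i,ed_i])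
--         return ubp_info
-- ===== SOURCE B (Python) =====
-- def type_1_ubp(dp):
--     ubp_info = []
--     last_open = -1
--     seen_close = False
--     for i, c in enumerate(dp):
--         if c == ')' and last_open != -1:
--             seen_close = True
--         if c == '(':
--             if last_open != -1 and not seen_close and i - last_open > 1:
--                 ubp_info.append([last_open, i])
--             last_open = i
--             seen_close = False
--     return ubp_info
-- ===== Notes on version B (the rewrite author's own statement) =====
-- stated objective: alternative
-- what changed: Replaced A's two passes (first collect every open-bracket position into a list, then re-scan each in-between substring for a close bracket via slicing and indexed lookups) by one single left-to-right pass carrying the last open-bracket index and a seen-close flag, emitting each qualifying pair immediately; no position list and no slices.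
import Mathlib
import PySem

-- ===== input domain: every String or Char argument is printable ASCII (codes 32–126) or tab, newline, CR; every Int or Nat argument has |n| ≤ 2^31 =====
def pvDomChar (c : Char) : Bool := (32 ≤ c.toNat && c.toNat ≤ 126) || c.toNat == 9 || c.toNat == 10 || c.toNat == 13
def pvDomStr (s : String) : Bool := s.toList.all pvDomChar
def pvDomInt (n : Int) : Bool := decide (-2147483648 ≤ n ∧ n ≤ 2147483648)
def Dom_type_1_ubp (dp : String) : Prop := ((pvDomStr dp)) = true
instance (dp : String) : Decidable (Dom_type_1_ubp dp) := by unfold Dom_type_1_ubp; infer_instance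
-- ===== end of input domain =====

-- B replaces A's two passes (collect '(' positions, then slice-scan between consecutive ones)
-- by a single pass with a last-open index and a seen-close flag; same return value, alternative algorithm.

-- ===== PORT A =====
def type_1_ubp (dp : String) : List (List Int) :=
  let cs := dp.toList
  let candi : List Int := (PySem.List.pyRange 0 (cs.length : Int) 1).foldl
      (fun acc i => if PySem.List.pyGetD cs i ' ' = '(' then acc ++ [i] else acc) []
  if candi.length ≤ 1 then []
  else (PySem.List.pyRange 0 ((candi.length : Int) - 1) 1).foldl
      (fun acc i =>
        let st := PySem.List.pyGetD candi i 0
        let ed := PySem.List.pyGetD candi (i + 1) 0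
        if ed - st > 1 ∧ ')' ∉ PySem.List.slice cs (some (st + 1)) (some ed)
        then acc ++ [[st, ed]] else acc) []

-- ===== PORT B =====
-- the single pass of Source B: index i, last_open lo, seen_close sc, accumulator res
def ubpGo : List Char → Nat → Int → Bool → List (List Int) → List (List Int)
  | [], _, _, _, res => res
  | c :: rest, i, lo, sc, res =>
    let sc' := if c = ')' ∧ lo ≠ -1 then true else sc
    if c = '(' then
      ubpGo rest (i + 1) (i : Int) false
        (if lo ≠ -1 ∧ sc' = false ∧ (i : Int) - lo > 1 then res ++ [[lo, (i : Int)]] else res)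
    else ubpGo rest (i + 1) lo sc' res

def type_1_ubp_alt (dp : String) : List (List Int) :=
  ubpGo dp.toList 0 (-1) false []

-- ===== PRECONDITION & SPEC =====
def Spec_type_1_ubp (dp : String) (out : List (List Int)) : Prop := out = type_1_ubp_alt dp
instance (dp : String) (out : List (List Int)) : Decidable (Spec_type_1_ubp dp out) := by unfold Spec_type_1_ubp; infer_instance

-- ===== CLAIM (what is proved, stated in full; the proofs are below) =====
def Claim_equal_type_1_ubp : Prop := ∀ (dp : String), Dom_type_1_ubp dp → Spec_type_1_ubp dp (type_1_ubp dp)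

-- ===== LEMMAS AND PROOFS =====

-- positions (as Ints, starting at s) of '(' in a character list
def opensFrom : List Char → Int → List Int
  | [], _ => []
  | c :: rest, s => if c = '(' then s :: opensFrom rest (s + 1) else opensFrom rest (s + 1)

-- A's second loop, structurally: adjacent pairs of the open list that pass the slice test
def pairsA (cs : List Char) : List Int → List (List Int)
  | p :: q :: rest =>
    (if q - p > 1 ∧ ')' ∉ PySem.List.slice cs (some (p + 1)) (some q) then [[p, q]] else [])
      ++ pairsA cs (q :: rest)
  | _ => []

lemma pairsA_short (cs : List Char) (l : List Int) (h : l.length ≤ 1) : pairsA cs l = [] := by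
  match l with
  | [] => rfl
  | [p] => rfl
  | p :: q :: rest => simp at h

lemma candi_eq (cs : List Char) : ∀ (s : Int) (acc : List Int),
    (PySem.List.enumerate cs s).foldl
      (fun acc (p : Int × Char) => if p.2 = '(' then acc ++ [p.1] else acc) acc
      = acc ++ opensFrom cs s := by
  induction cs with
  | nil => intro s acc; simp [PySem.List.enumerate_nil, opensFrom]
  | cons c rest ih =>
    intro s acc
    rw [PySem.List.enumerate_cons]
    by_cases hc : c = '('
    · simp [hc, opensFrom, ih]
    · simp [hc, opensFrom, ih]

lemma foldA_eq_candi (cs : List Char) :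
    (PySem.List.pyRange 0 (cs.length : Int) 1).foldl
      (fun acc i => if PySem.List.pyGetD cs i ' ' = '(' then acc ++ [i] else acc) []
      = opensFrom cs 0 := by
  have h := candi_eq cs 0 []
  rw [PySem.List.enumerate_eq_map_pyRange (d := ' '), List.foldl_map] at h
  simpa using h

lemma rangeFold (cs : List Char) : ∀ (l : List Int) (acc : List (List Int)),
    (List.range (l.length - 1)).foldl
      (fun acc k =>
        if l.getD (k + 1) 0 - l.getD k 0 > 1 ∧
            ')' ∉ PySem.List.slice cs (some (l.getD k 0 + 1)) (some (l.getD (k + 1) 0))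
        then acc ++ [[l.getD k 0, l.getD (k + 1) 0]] else acc) acc
      = acc ++ pairsA cs l := by
  intro l
  induction l with
  | nil => intro acc; simp [pairsA]
  | cons p t ih =>
    cases t with
    | nil => intro acc; simp [pairsA]
    | cons q rest =>
      intro acc
      rw [show (p :: q :: rest).length - 1 = rest.length + 1 from by simp]
      rw [List.range_succ_eq_map, List.foldl_cons, List.foldl_map]
      simp only [List.getD_cons_succ, List.getD_cons_zero] at ih ⊢
      rw [show rest.length = (q :: rest).length - 1 from by simp, ih]
      show _ = acc ++ pairsA cs (p :: q :: rest)
      rw [pairsA]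
      split
      · simp
      · simp

lemma foldA2_eq_pairsA (cs : List Char) (l : List Int) :
    (PySem.List.pyRange 0 ((l.length : Int) - 1) 1).foldl
      (fun acc i =>
        let st := PySem.List.pyGetD l i 0
        let ed := PySem.List.pyGetD l (i + 1) 0
        if ed - st > 1 ∧ ')' ∉ PySem.List.slice cs (some (st + 1)) (some ed)
        then acc ++ [[st, ed]] else acc) []
      = pairsA cs l := by
  rw [PySem.List.pyRange_one]
  rw [show ((l.length : Int) - 1 - 0).toNat = l.length - 1 from by omega]
  rw [List.foldl_map]
  have hcast : ∀ k : Nat, ((k : Int) + 1) = (((k + 1 : Nat)) : Int) := by intro k; push_cast; ring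
  simp only [zero_add, hcast, PySem.List.pyGetD_natCast]
  simpa using rangeFold cs l []

lemma ubpGo_eq (cs : List Char) : ∀ (suf : List Char) (i : Nat) (lo : Int) (sc : Bool)
    (res : List (List Int)),
    suf = cs.drop i →
    ((lo = -1 ∧ sc = false) ∨
      (0 ≤ lo ∧ lo < (i : Int) ∧
        (sc = true ↔ ')' ∈ PySem.List.slice cs (some (lo + 1)) (some (i : Int))))) →
    ubpGo suf i lo sc res
      = res ++ pairsA cs (if lo = -1 then opensFrom suf (i : Int) else lo :: opensFrom suf (i : Int)) := by
  intro suf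
  induction suf with
  | nil =>
    intro i lo sc res _ _
    have h : ∀ L : List Int, L.length ≤ 1 → res ++ pairsA cs L = res := by
      intro L hL; rw [pairsA_short cs L hL, List.append_nil]
    show res = _
    split
    · exact (h _ (by simp [opensFrom])).symm
    · exact (h _ (by simp [opensFrom])).symm
  | cons c rest ih =>
    intro i lo sc res hdrop hinv
    have hi : i < cs.length := by
      have hlen := congrArg List.length hdrop
      simp [List.length_drop] at hlen
      omega
    have hrest : rest = cs.drop (i + 1) := by
      have ht := congrArg List.tail hdrop
      simpa [List.tail_drop] using ht
    have hci : cs[i]? = some c := by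
      have h0 : (cs.drop i)[0]? = some c := by rw [← hdrop]; rfl
      simpa [List.getElem?_drop] using h0
    by_cases hc : c = '('
    · -- current char opens: emit (maybe), reset state
      subst hc
      rw [show ubpGo ('(' :: rest) i lo sc res
            = ubpGo rest (i + 1) (i : Int) false
                (if lo ≠ -1 ∧ sc = false ∧ (i : Int) - lo > 1 then res ++ [[lo, (i : Int)]] else res)
          from by simp [ubpGo]]
      have hempty : PySem.List.slice cs (some ((i : Int) + 1)) (some ((i : Int) + 1)) = [] := by
        rw [PySem.List.slice_toNat cs (by omega) (by omega)]; simp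
      rw [ih (i + 1) (i : Int) false _ hrest
            (Or.inr ⟨by omega, by omega, by simp [hempty]⟩)]
      rw [if_neg (show ¬((i : Int) = -1) from by omega)]
      have hops : opensFrom ('(' :: rest) (i : Int) = (i : Int) :: opensFrom rest (((i + 1 : Nat)) : Int) := by
        simp only [opensFrom, reduceIte]
        push_cast
        ring_nf
      rcases hinv with ⟨hlo, hsc⟩ | ⟨hlo0, hloi, hsc⟩
      · subst hlo hsc
        rw [if_neg (show ¬((-1 : Int) ≠ -1 ∧ (false : Bool) = false ∧ (i : Int) - -1 > 1) from by simp),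
            if_pos rfl, hops]
      · rw [if_neg (show ¬(lo = -1) from by omega), hops]
        have hp : pairsA cs (lo :: (i : Int) :: opensFrom rest (((i + 1 : Nat)) : Int))
            = (if (i : Int) - lo > 1 ∧ ')' ∉ PySem.List.slice cs (some (lo + 1)) (some (i : Int))
               then [[lo, (i : Int)]] else [])
              ++ pairsA cs ((i : Int) :: opensFrom rest (((i + 1 : Nat)) : Int)) := rfl
        rw [hp]
        have hiff : (lo ≠ -1 ∧ sc = false ∧ (i : Int) - lo > 1)
            ↔ ((i : Int) - lo > 1 ∧ ')' ∉ PySem.List.slice cs (some (lo + 1)) (some (i : Int))) := by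
          constructor
          · rintro ⟨_, h1, h2⟩
            refine ⟨h2, fun hm => ?_⟩
            rw [hsc.mpr hm] at h1
            simp at h1
          · rintro ⟨h2, h1⟩
            refine ⟨by omega, ?_, h2⟩
            cases hsc' : sc with
            | false => rfl
            | true => exact absurd (hsc.mp hsc') h1
        by_cases hcnd : (i : Int) - lo > 1 ∧ ')' ∉ PySem.List.slice cs (some (lo + 1)) (some (i : Int))
        · rw [if_pos (hiff.mpr hcnd), if_pos hcnd]
          simp
        · rw [if_neg (fun h => hcnd (hiff.mp h)), if_neg hcnd]
          simp
    · -- current char does not open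
      rw [show ubpGo (c :: rest) i lo sc res
            = ubpGo rest (i + 1) lo (if c = ')' ∧ lo ≠ -1 then true else sc) res
          from by simp [ubpGo, hc]]
      have hops : opensFrom (c :: rest) (i : Int) = opensFrom rest (((i + 1 : Nat)) : Int) := by
        simp only [opensFrom, if_neg hc]
        push_cast
        ring_nf
      rw [hops]
      rcases hinv with ⟨hlo, hsc⟩ | ⟨hlo0, hloi, hsc⟩
      · subst hlo hsc
        rw [if_neg (show ¬(c = ')' ∧ (-1 : Int) ≠ -1) from by simp)]
        exact ih (i + 1) (-1) false res hrest (Or.inl ⟨rfl, rfl⟩)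
      · have hlon : lo ≠ -1 := by omega
        have hsnoc : PySem.List.slice cs (some (lo + 1)) (some (((i + 1 : Nat)) : Int))
            = PySem.List.slice cs (some (lo + 1)) (some (i : Int)) ++ [c] := by
          rw [PySem.List.slice_toNat cs (by omega) (by omega),
              PySem.List.slice_toNat cs (by omega) (by omega)]
          rw [show ((((i + 1 : Nat)) : Int)).toNat = (((i : Int)).toNat) + 1 from by omega]
          rw [show (((i : Int)).toNat) + 1 - (lo + 1).toNat
                = ((((i : Int)).toNat) - (lo + 1).toNat) + 1 from by omega]
          rw [List.take_add_one, List.getElem?_drop,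
              show (lo + 1).toNat + ((((i : Int)).toNat) - (lo + 1).toNat) = (((i : Int)).toNat) from by omega]
          rw [show (((i : Int)).toNat) = i from by omega, hci]
          rfl
        refine ih (i + 1) lo _ res hrest (Or.inr ⟨hlo0, by omega, ?_⟩)
        rw [hsnoc]
        by_cases hcp : c = ')'
        · simp [hcp, hlon]
        · rw [if_neg (show ¬(c = ')' ∧ lo ≠ -1) from by simp [hcp])]
          rw [hsc]
          simp [Ne.symm hcp]

-- ===== VERDICT (by name: the statement is the Claim_ definition above) =====
theorem type_1_ubp_spec : Claim_equal_type_1_ubp := by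
  intro dp _
  unfold Spec_type_1_ubp type_1_ubp type_1_ubp_alt
  simp only [foldA_eq_candi, foldA2_eq_pairsA,
    ubpGo_eq dp.toList dp.toList 0 (-1) false [] (by simp) (Or.inl ⟨rfl, rfl⟩)]
  simp only [List.nil_append, Nat.cast_zero, if_true]
  split
  · exact (pairsA_short _ _ (by omega)).symm
  · rfl
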